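-- pv_equiv track=rewrite | github.com/yassiroz/sekaictf-2025 | reverse/sekai-craft/challenge/encrypt.py | xtea_mc_encrypt
-- ===== SOURCE A (Python) =====
-- DELTA = 0x0aef98da
--
-- MASK32 = 0xFFFFFFFF
--
-- ROUNDS = 32
--
-- def G(x: int, k: int) -> int:
--     return ((((x << 4) & MASK32) ^ (x >> 5)) + x ^ k) & MASK32
--
-- def xtea_mc_encrypt(v0: int, v1: int, key: tuple[int, int, int, int],
--                     rounds: int = ROUNDS) -> tuple[int, int]:
--     k0, k1, k2, k3 = key
--     k = (k0, k1, k2, k3)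
--
--     s = 0
--     for _ in range(rounds):
--         s = (s + DELTA) & MASK32
--         v0 = (v0 + G(v1, k[s & 3])) & MASK32
--         v1 = (v1 + G(v0, k[(s >> 11) & 3])) & MASK32
--     return v0, v1
-- ===== SOURCE B (Python) =====
-- DELTA = 0x0aef98da
--
-- MASK32 = 0xFFFFFFFF
--
-- ROUNDS = 32
--
-- def G(x: int, k: int) -> int:
--     return ((((x << 4) & MASK32) ^ (x >> 5)) + x ^ k) & MASK32
--
-- def xtea_mc_encrypt(v0: int, v1: int, key: tuple[int, int, int, int],
--                     rounds: int = ROUNDS) -> tuple[int, int]: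
--     # phase 1: precompute the round-key schedule; s for round i in closed form
--     schedule = [((key[(((i + 1) * DELTA) & MASK32) & 3]),
--                  (key[((((i + 1) * DELTA) & MASK32) >> 11) & 3]))
--                 for i in range(rounds)]
--     # phase 2: apply the schedule
--     for ka, kb in schedule:
--         v0 = (v0 + G(v1, ka)) & MASK32
--         v1 = (v1 + G(v0, kb)) & MASK32
--     return v0, v1
-- ===== Notes on version B (the rewrite author's own statement) =====
-- stated objective: alternative
-- what changed: A's single fused loop that accumulates s and updates (v0, v1) in one pass is split into two phases: a precomputed round-key schedule whose per-round sum s is given in closed form ((i+1)*DELTA) & MASK32, then a separate pass applying the schedule to (v0, v1).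
import Mathlib
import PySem

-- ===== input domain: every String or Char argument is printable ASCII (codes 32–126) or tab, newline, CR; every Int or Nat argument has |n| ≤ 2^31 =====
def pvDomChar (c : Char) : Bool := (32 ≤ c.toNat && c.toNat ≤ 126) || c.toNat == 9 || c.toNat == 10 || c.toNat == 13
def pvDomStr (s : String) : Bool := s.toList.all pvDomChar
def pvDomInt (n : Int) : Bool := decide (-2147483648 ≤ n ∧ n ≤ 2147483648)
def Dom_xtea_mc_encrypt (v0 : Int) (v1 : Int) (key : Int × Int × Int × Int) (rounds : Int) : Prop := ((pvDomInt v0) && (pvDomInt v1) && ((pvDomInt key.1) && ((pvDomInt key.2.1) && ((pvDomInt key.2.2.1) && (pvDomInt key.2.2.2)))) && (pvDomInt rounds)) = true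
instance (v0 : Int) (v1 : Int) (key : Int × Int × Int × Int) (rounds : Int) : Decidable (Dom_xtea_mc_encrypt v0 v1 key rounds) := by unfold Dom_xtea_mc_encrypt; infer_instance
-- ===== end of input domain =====

-- B restructures A's single fused loop into two phases — a precomputed round-key
-- schedule (with the round sum s in closed form) and a separate application pass
-- over that schedule — with identical results (objective: alternative).

-- ===== PORT A =====
-- G(x, k), shared helper of both Pythons
def pvG (x k : Int) : Int :=
  PySem.Int.band
    (PySem.Int.bxor
      (PySem.Int.bxor (PySem.Int.band (x <<< (4 : Nat)) 0xFFFFFFFF) (x >>> (5 : Nat)) + x) k)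
    0xFFFFFFFF

-- the body of A's single fused loop: state (s, v0, v1)
def pvStepA (ks : List Int) (st : Int × Int × Int) (_ : Int) : Int × Int × Int :=
  let s := PySem.Int.band (st.1 + 0x0aef98da) 0xFFFFFFFF
  let a := PySem.Int.band (st.2.1 + pvG st.2.2 (PySem.List.pyGetD ks (PySem.Int.band s 3) 0)) 0xFFFFFFFF
  let b := PySem.Int.band (st.2.2 + pvG a (PySem.List.pyGetD ks (PySem.Int.band (s >>> (11 : Nat)) 3) 0)) 0xFFFFFFFF
  (s, a, b)

def xtea_mc_encrypt (v0 : Int) (v1 : Int) (key : Int × Int × Int × Int) (rounds : Int) : Int × Int :=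
  let ks : List Int := [key.1, key.2.1, key.2.2.1, key.2.2.2]
  let st := (PySem.List.pyRange 0 rounds 1).foldl (pvStepA ks) (0, v0, v1)
  (st.2.1, st.2.2)

-- ===== PORT B =====
-- B phase 1: the round-key pair of round i, with s in closed form
def pvPair (ks : List Int) (i : Int) : Int × Int :=
  (PySem.List.pyGetD ks (PySem.Int.band (PySem.Int.band ((i + 1) * 0x0aef98da) 0xFFFFFFFF) 3) 0,
   PySem.List.pyGetD ks (PySem.Int.band ((PySem.Int.band ((i + 1) * 0x0aef98da) 0xFFFFFFFF) >>> (11 : Nat)) 3) 0)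

-- B phase 2: apply one schedule entry
def pvApply (p : Int × Int) (kk : Int × Int) : Int × Int :=
  let a := PySem.Int.band (p.1 + pvG p.2 kk.1) 0xFFFFFFFF
  let b := PySem.Int.band (p.2 + pvG a kk.2) 0xFFFFFFFF
  (a, b)

def xtea_mc_encrypt_alt (v0 : Int) (v1 : Int) (key : Int × Int × Int × Int) (rounds : Int) : Int × Int :=
  let ks : List Int := [key.1, key.2.1, key.2.2.1, key.2.2.2]
  let schedule := (PySem.List.pyRange 0 rounds 1).map (pvPair ks)
  schedule.foldl pvApply (v0, v1)

-- ===== PRECONDITION & SPEC =====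
def Spec_xtea_mc_encrypt (v0 : Int) (v1 : Int) (key : Int × Int × Int × Int) (rounds : Int) (out : Int × Int) : Prop := out = xtea_mc_encrypt_alt v0 v1 key rounds
instance (v0 : Int) (v1 : Int) (key : Int × Int × Int × Int) (rounds : Int) (out : Int × Int) : Decidable (Spec_xtea_mc_encrypt v0 v1 key rounds out) := by unfold Spec_xtea_mc_encrypt; infer_instance

-- ===== CLAIM (what is proved, stated in full; the proofs are below) =====
def Claim_equal_xtea_mc_encrypt : Prop := ∀ (v0 : Int) (v1 : Int) (key : Int × Int × Int × Int) (rounds : Int), Dom_xtea_mc_encrypt v0 v1 key rounds → Spec_xtea_mc_encrypt v0 v1 key rounds (xtea_mc_encrypt v0 v1 key rounds)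

-- ===== LEMMAS AND PROOFS =====

-- masking with 0xFFFFFFFF is reduction mod 2^32 on nonnegative ints
lemma pv_band_mask (a : Int) (ha : 0 ≤ a) :
    PySem.Int.band a 0xFFFFFFFF = a % 4294967296 := by
  rw [PySem.Int.band_of_nonneg ha (by norm_num)]
  have h := Nat.and_two_pow_sub_one_eq_mod a.toNat 32
  norm_num at h
  rw [show Int.toNat 4294967295 = 4294967295 from rfl, h]
  omega

-- A's accumulated round sum after one more step equals B's closed form
lemma pv_s_step (n : Nat) :
    PySem.Int.band (PySem.Int.band ((n : Int) * 0x0aef98da) 0xFFFFFFFF + 0x0aef98da) 0xFFFFFFFF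
      = PySem.Int.band (((n : Int) + 1) * 0x0aef98da) 0xFFFFFFFF := by
  have h0 : (0:Int) ≤ (n : Int) * 0x0aef98da := by positivity
  rw [pv_band_mask _ h0, pv_band_mask _ (by omega), pv_band_mask _ (by positivity)]
  omega

-- main invariant: A's fold over the first n rounds carries s = band (n*DELTA) M
-- and its (v0, v1) components equal B's fold over the schedule of those rounds
lemma pv_loop_eq (ks : List Int) (v0 v1 : Int) (n : Nat) :
    (PySem.List.pyRange 0 (n : Int) 1).foldl (pvStepA ks) (0, v0, v1)
      = (PySem.Int.band ((n : Int) * 0x0aef98da) 0xFFFFFFFF,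
         ((PySem.List.pyRange 0 (n : Int) 1).map (pvPair ks)).foldl pvApply (v0, v1)) := by
  induction n with
  | zero =>
      rw [Nat.cast_zero, PySem.List.pyRange_one_eq_nil le_rfl]
      simp [pv_band_mask]
  | succ m ih =>
      have hr : PySem.List.pyRange 0 ((m : Int) + 1) 1
          = PySem.List.pyRange 0 (m : Int) 1 ++ [(m : Int)] :=
        PySem.List.pyRange_one_succ_right (by positivity)
      push_cast
      rw [hr, List.foldl_append, List.map_append, List.foldl_append, ih]
      simp only [List.map_cons, List.map_nil, List.foldl_cons, List.foldl_nil]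
      rw [show (pvStepA ks) (PySem.Int.band ((m : Int) * 0x0aef98da) 0xFFFFFFFF,
            ((PySem.List.pyRange 0 (m : Int) 1).map (pvPair ks)).foldl pvApply (v0, v1)) (m : Int)
          = _ from rfl]
      simp only [pvStepA, pvApply, pvPair, pv_s_step m]

-- ===== VERDICT (by name: the statement is the Claim_ definition above) =====
theorem xtea_mc_encrypt_spec : Claim_equal_xtea_mc_encrypt := by
  intro v0 v1 key rounds _
  unfold Spec_xtea_mc_encrypt xtea_mc_encrypt xtea_mc_encrypt_alt
  by_cases h : 0 ≤ rounds
  · have hn : rounds = ((rounds.toNat : Nat) : Int) := (Int.toNat_of_nonneg h).symm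
    rw [hn]
    simp only [pv_loop_eq]
  · rw [PySem.List.pyRange_one_eq_nil (by omega)]
    rfl
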